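-- pv_equiv track=rewrite | github.com/MacroXie04/Cyberlens | backend/scanner/services/adk_code_pipeline.py | _iter_chunk_ranges
-- ===== SOURCE A (Python) =====
-- CHUNK_LINE_WINDOW = 120
--
-- CHUNK_LINE_OVERLAP = 20
--
-- def _iter_chunk_ranges(total_lines: int) -> list[tuple[int, int]]:
--     if total_lines <= 0:
--         return []
--     ranges = []
--     start = 1
--     while start <= total_lines:
--         end = min(total_lines, start + CHUNK_LINE_WINDOW - 1)
--         ranges.append((start, end))
--         if end == total_lines:
--             break
--         start = max(end - CHUNK_LINE_OVERLAP + 1, start + 1)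
--     return ranges
-- ===== SOURCE B (Python) =====
-- CHUNK_LINE_WINDOW = 120
--
-- CHUNK_LINE_OVERLAP = 20
--
-- def _iter_chunk_ranges(total_lines: int) -> list[tuple[int, int]]:
--     if total_lines <= 0:
--         return []
--     step = CHUNK_LINE_WINDOW - CHUNK_LINE_OVERLAP
--     if total_lines <= CHUNK_LINE_WINDOW:
--         n = 1
--     else:
--         n = 1 + -(-(total_lines - CHUNK_LINE_WINDOW) // step)
--     return [(1 + i * step, min(total_lines, i * step + CHUNK_LINE_WINDOW))
--             for i in range(n)]
-- ===== Notes on version B (the rewrite author's own statement) =====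
-- stated objective: simpler
-- what changed: Replaced the stateful while/break loop with a closed-form chunk count (ceiling division) and a single comprehension computing each chunk's start/end arithmetically.
import Mathlib
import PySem

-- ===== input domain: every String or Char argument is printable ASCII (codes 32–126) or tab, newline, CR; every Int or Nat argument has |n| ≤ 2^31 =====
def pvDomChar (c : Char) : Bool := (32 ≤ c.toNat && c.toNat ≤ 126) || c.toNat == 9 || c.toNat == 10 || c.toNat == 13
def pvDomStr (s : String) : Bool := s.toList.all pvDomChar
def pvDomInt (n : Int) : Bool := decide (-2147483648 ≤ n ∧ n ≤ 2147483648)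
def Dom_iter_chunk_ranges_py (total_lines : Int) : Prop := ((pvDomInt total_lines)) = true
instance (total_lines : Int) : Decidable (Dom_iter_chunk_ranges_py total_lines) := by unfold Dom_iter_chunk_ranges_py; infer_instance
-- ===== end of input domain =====

-- B replaces A's stateful while/break loop by a closed-form chunk count and a comprehension (objective: simpler).

-- ===== PORT A =====
-- the while loop of A: current `start`, emits (start, end) pairs in order; `break` = stop recursing
def iterChunkLoopA (total_lines start : Int) : List (Int × Int) :=
  if h : start ≤ total_lines then
    if h2 : min total_lines (start + 120 - 1) = total_lines then
      [(start, min total_lines (start + 120 - 1))]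
    else
      (start, min total_lines (start + 120 - 1)) ::
        iterChunkLoopA total_lines (max (min total_lines (start + 120 - 1) - 20 + 1) (start + 1))
  else []
termination_by (total_lines - start).toNat
decreasing_by
  simp only [min_def] at h2 ⊢
  split at h2 <;> split <;> omega

def iter_chunk_ranges_py (total_lines : Int) : List (Int × Int) :=
  if total_lines ≤ 0 then [] else iterChunkLoopA total_lines 1

-- ===== PORT B =====
def iter_chunk_ranges_py_alt (total_lines : Int) : List (Int × Int) :=
  if total_lines ≤ 0 then []
  else
    let step : Int := 120 - 20
    let n : Int :=
      if total_lines ≤ 120 then 1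
      else 1 + -(PySem.Int.floordiv (-(total_lines - 120)) step)
    (PySem.List.pyRange 0 n 1).map
      (fun i => (1 + i * step, min total_lines (i * step + 120)))

-- ===== PRECONDITION & SPEC =====
def Spec_iter_chunk_ranges_py (total_lines : Int) (out : List (Int × Int)) : Prop := out = iter_chunk_ranges_py_alt total_lines
instance (total_lines : Int) (out : List (Int × Int)) : Decidable (Spec_iter_chunk_ranges_py total_lines out) := by unfold Spec_iter_chunk_ranges_py; infer_instance

-- ===== CLAIM (what is proved, stated in full; the proofs are below) =====
def Claim_equal_iter_chunk_ranges_py : Prop := ∀ (total_lines : Int), Dom_iter_chunk_ranges_py total_lines → Spec_iter_chunk_ranges_py total_lines (iter_chunk_ranges_py total_lines)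

-- ===== LEMMAS AND PROOFS =====

-- A's loop from `start` produces exactly m+1 chunks, starts spaced by 100,
-- where m = ((total - start).toNat - 20) / 100 (Nat arithmetic).
theorem iterChunkLoopA_eq (m : Nat) :
    ∀ (total s : Int), s ≤ total → ((total - s).toNat - 20) / 100 = m →
    iterChunkLoopA total s =
      (List.range (m + 1)).map
        (fun i : Nat => ((s + (i : Int) * 100, min total (s + (i : Int) * 100 + 119)) : Int × Int)) := by
  induction m with
  | zero =>
    intro total s hs hm
    have he : min total (s + 120 - 1) = total := by omega
    rw [iterChunkLoopA.eq_def]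
    simp [hs, he]
    omega
  | succ k ih =>
    intro total s hs hm
    have hgt : s + 119 < total := by omega
    rw [iterChunkLoopA.eq_def]
    rw [dif_pos hs]
    have he : min total (s + 120 - 1) = s + 119 := by omega
    rw [he]
    have hne : ¬ (s + 119 = total) := by omega
    rw [dif_neg hne]
    have hmax : max (s + 119 - 20 + 1) (s + 1) = s + 100 := by omega
    rw [hmax]
    rw [ih total (s + 100) (by omega) (by omega)]
    conv_rhs => rw [List.range_succ_eq_map]
    simp only [List.map_cons, List.map_map]
    congr 1
    · simp only [Prod.mk.injEq, Nat.cast_zero, zero_mul, add_zero]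
      exact ⟨trivial, by omega⟩
    · apply List.map_congr_left
      intro i _
      simp only [Function.comp, Prod.mk.injEq]
      push_cast
      constructor <;> omega

-- ===== VERDICT (by name: the statement is the Claim_ definition above) =====
theorem iter_chunk_ranges_py_spec : Claim_equal_iter_chunk_ranges_py := by
  intro t _
  unfold Spec_iter_chunk_ranges_py iter_chunk_ranges_py iter_chunk_ranges_py_alt
  by_cases h0 : t ≤ 0
  · simp [h0]
  · rw [if_neg h0, if_neg h0]
    set m : Nat := ((t - 1).toNat - 20) / 100 with hm
    rw [iterChunkLoopA_eq m t 1 (by omega) rfl]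
    simp only [PySem.Int.floordiv]
    have hn : (if t ≤ 120 then (1:Int) else 1 + -(Int.fdiv (-(t - 120)) (120 - 20))) = (m : Int) + 1 := by
      split
      · omega
      · have hfd : Int.fdiv (-(t - 120)) (120 - 20) = (-(t - 120)) / 100 := by
          rw [Int.fdiv_eq_ediv]
          norm_num
        rw [hfd]
        omega
    rw [hn, PySem.List.pyRange_one]
    have h1 : ((m : Int) + 1 - 0).toNat = m + 1 := by omega
    rw [h1, List.map_map]
    apply List.map_congr_left
    intro i _
    simp only [Function.comp, zero_add, Prod.mk.injEq]
    constructor <;> omega
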